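-- pv_equiv track=rewrite | github.com/Awesomeness360/MyWordle | wordle.py | heuristicTwo
-- ===== SOURCE A (Python) =====
-- def debug():
--     return False
--
-- def contains(ch, st):
--     i = 0
--     while (i < len(st)):
--         if (st[i] == ch):
--             return True
--         i += 1
--     return False
--
-- def heuristicTwo(word, letterArray):
--     wordScore = 0
--     if (debug()):
--         print ("heuristicTwo: word is", word)
--         print ("heuristicTwo: letterArray is", letterArray)
--     i = 0
--     while (i < len(letterArray)):
--         if (contains(chr(i + 97), word)):
--             wordScore += letterArray[i]
--         i += 1
--     return wordScore
-- ===== SOURCE B (Python) =====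
-- def heuristicTwo(word, letterArray):
--     wordScore = 0
--     n = len(letterArray)
--     for ch in set(word):
--         idx = ord(ch) - 97
--         if 0 <= idx < n:
--             wordScore += letterArray[idx]
--     return wordScore
-- ===== Notes on version B (the rewrite author's own statement) =====
-- stated objective: faster
-- what changed: Iterates over the set of the word's distinct characters with a direct index computation ord(ch)-97, instead of scanning all alphabet slots with an inner character-by-character membership scan of the word per slot.
import Mathlib
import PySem

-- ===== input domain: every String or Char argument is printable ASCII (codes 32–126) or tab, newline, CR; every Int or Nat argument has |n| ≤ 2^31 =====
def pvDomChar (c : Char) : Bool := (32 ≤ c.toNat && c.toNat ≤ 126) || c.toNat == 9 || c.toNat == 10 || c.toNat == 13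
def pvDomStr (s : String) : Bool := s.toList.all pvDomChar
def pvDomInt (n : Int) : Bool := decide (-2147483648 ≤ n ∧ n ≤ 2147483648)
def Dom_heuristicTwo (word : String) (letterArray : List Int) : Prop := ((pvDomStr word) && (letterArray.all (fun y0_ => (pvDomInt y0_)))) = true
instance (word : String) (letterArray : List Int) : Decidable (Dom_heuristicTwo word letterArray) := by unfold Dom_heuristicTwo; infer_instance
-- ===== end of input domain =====

-- B replaces A's scan of every alphabet slot (each with an inner character-by-character
-- scan of the word) by one pass over the word's distinct characters with a direct index.

-- ===== PORT A =====
-- 'contains(ch, st)': while i < len(st): if st[i] == ch: return True — a forward scan.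
def containsPy (ch : Char) : List Char → Bool
  | [] => false
  | c :: rest => if c == ch then true else containsPy ch rest

def heuristicTwo (word : String) (letterArray : List Int) : Int :=
  (PySem.List.pyRange 0 (letterArray.length : Int) 1).foldl
    (fun wordScore i =>
      if containsPy (Char.ofNat (i + 97).toNat) word.toList then
        wordScore + PySem.List.pyGetD letterArray i 0
      else wordScore) 0

-- ===== PORT B =====
def heuristicTwo_alt (word : String) (letterArray : List Int) : Int :=
  (PySem.Set.ofList word.toList).foldl
    (fun wordScore ch =>
      let idx : Int := (ch.toNat : Int) - 97
      if 0 ≤ idx ∧ idx < (letterArray.length : Int) then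
        wordScore + PySem.List.pyGetD letterArray idx 0
      else wordScore) 0

-- ===== PRECONDITION & SPEC =====
def Spec_heuristicTwo (word : String) (letterArray : List Int) (out : Int) : Prop := out = heuristicTwo_alt word letterArray
instance (word : String) (letterArray : List Int) (out : Int) : Decidable (Spec_heuristicTwo word letterArray out) := by unfold Spec_heuristicTwo; infer_instance

-- ===== CLAIM (what is proved, stated in full; the proofs are below) =====
def Claim_equal_heuristicTwo : Prop := ∀ (word : String) (letterArray : List Int), Dom_heuristicTwo word letterArray → Spec_heuristicTwo word letterArray (heuristicTwo word letterArray)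

-- ===== LEMMAS AND PROOFS =====

theorem containsPy_iff (ch : Char) (l : List Char) : containsPy ch l = true ↔ ch ∈ l := by
  induction l with
  | nil => simp [containsPy]
  | cons c rest ih =>
    by_cases h : c == ch
    · simp [containsPy, h]
      exact Or.inl (beq_iff_eq.mp h).symm
    · simp [containsPy, h, ih]
      intro he; exact absurd (beq_iff_eq.mpr he.symm) h

-- a fold 'if P x then acc + v x else acc' is init plus a sum of indicators
theorem foldl_if_add {α : Type} (P : α → Prop) [DecidablePred P] (v : α → Int)
    (l : List α) (a : Int) :
    l.foldl (fun acc x => if P x then acc + v x else acc) a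
      = a + (l.map (fun x => if P x then v x else 0)).sum := by
  induction l generalizing a with
  | nil => simp
  | cons x xs ih =>
    simp only [List.foldl_cons, List.map_cons, List.sum_cons, ih]
    split_ifs <;> ring

theorem sum_range_indicator (n k0 : Nat) (v : Nat → Int) :
    ((List.range n).map (fun k => if k = k0 then v k else 0)).sum
      = if k0 < n then v k0 else 0 := by
  induction n with
  | zero => simp
  | succ m ih =>
    rw [List.range_succ]
    simp only [List.map_append, List.sum_append, ih, List.map_cons, List.map_nil,
      List.sum_cons, List.sum_nil]
    by_cases h : k0 < m
    · have hne : ¬ (m = k0) := by omega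
      simp [h, hne, Nat.lt_succ_of_lt h]
    · by_cases h2 : m = k0
      · simp [h2]
      · simp [h, h2]; omega


theorem toNat_ofNat_cases (n : Nat) : (Char.ofNat n).toNat = n ∨ (Char.ofNat n).toNat = 0 := by
  by_cases h : n.isValidChar
  · left; simp [Char.ofNat, h]
  · right; simp [Char.ofNat, h]

-- for a character of the word (1 ≤ toNat ≤ 126), the alphabet-slot indicator sum collapses
theorem single_char_sum (arr : List Int) (c : Char) (hc1 : 1 ≤ c.toNat) (hc2 : c.toNat ≤ 126) :
    ((List.range arr.length).map
        (fun k => if Char.ofNat (k + 97) = c then arr.getD k 0 else 0)).sum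
      = (if 0 ≤ (c.toNat : Int) - 97 ∧ (c.toNat : Int) - 97 < (arr.length : Int) then
          PySem.List.pyGetD arr ((c.toNat : Int) - 97) 0 else 0) := by
  by_cases h97 : 97 ≤ c.toNat
  · have hiff : ∀ k : Nat, (Char.ofNat (k + 97) = c) ↔ k = c.toNat - 97 := by
      intro k
      constructor
      · intro he
        rcases toNat_ofNat_cases (k + 97) with h | h <;> rw [he] at h <;> omega
      · intro hk
        have hk97 : k + 97 = c.toNat := by omega
        rw [hk97, Char.ofNat_toNat]
    have := sum_range_indicator arr.length (c.toNat - 97) (fun k => arr.getD k 0)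
    simp only [hiff]
    rw [this]
    have hcast : (c.toNat : Int) - 97 = ((c.toNat - 97 : Nat) : Int) := by omega
    rw [hcast, PySem.List.pyGetD_natCast]
    by_cases hlt : c.toNat - 97 < arr.length
    · have h0 : (0 : Int) ≤ ((c.toNat - 97 : Nat) : Int) ∧ ((c.toNat - 97 : Nat) : Int) < (arr.length : Int) := by
        constructor <;> omega
      rw [if_pos h0]
      simp [hlt]
    · have h0 : ¬ ((0 : Int) ≤ ((c.toNat - 97 : Nat) : Int) ∧ ((c.toNat - 97 : Nat) : Int) < (arr.length : Int)) := by
        intro h; omega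
      rw [if_neg h0]
      simp [hlt]
  · have hfalse : ∀ k : Nat, ¬ (Char.ofNat (k + 97) = c) := by
      intro k he
      rcases toNat_ofNat_cases (k + 97) with h | h <;> rw [he] at h <;> omega
    have hneg : ¬ ((0 : Int) ≤ (c.toNat : Int) - 97 ∧ (c.toNat : Int) - 97 < (arr.length : Int)) := by
      intro h; omega
    simp only [hfalse, if_false]
    simp only [List.map_const', List.sum_replicate, smul_zero]
    rw [if_neg hneg]

-- the alphabet-indexed sum over membership in a duplicate-free character list S
-- equals the S-indexed sum of in-range slot values
theorem main_sum (arr : List Int) (S : List Char) (hnd : S.Nodup)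
    (hb : ∀ c ∈ S, 1 ≤ c.toNat ∧ c.toNat ≤ 126) :
    ((List.range arr.length).map
        (fun k => if Char.ofNat (k + 97) ∈ S then arr.getD k 0 else 0)).sum
      = (S.map (fun c =>
          if 0 ≤ (c.toNat : Int) - 97 ∧ (c.toNat : Int) - 97 < (arr.length : Int) then
            PySem.List.pyGetD arr ((c.toNat : Int) - 97) 0 else 0)).sum := by
  induction S with
  | nil => simp
  | cons c S' ih =>
    have hcS' : c ∉ S' := (List.nodup_cons.mp hnd).1
    have hnd' : S'.Nodup := (List.nodup_cons.mp hnd).2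
    have hb' : ∀ d ∈ S', 1 ≤ d.toNat ∧ d.toNat ≤ 126 := fun d hd => hb d (List.mem_cons_of_mem c hd)
    have hsplit : ∀ k : Nat,
        (if Char.ofNat (k + 97) ∈ (c :: S') then arr.getD k 0 else 0)
          = (if Char.ofNat (k + 97) = c then arr.getD k 0 else 0)
            + (if Char.ofNat (k + 97) ∈ S' then arr.getD k 0 else 0) := by
      intro k
      by_cases he : Char.ofNat (k + 97) = c
      · simp [he, hcS']
      · by_cases hm : Char.ofNat (k + 97) ∈ S' <;> simp [he, hm]
    calc ((List.range arr.length).map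
            (fun k => if Char.ofNat (k + 97) ∈ (c :: S') then arr.getD k 0 else 0)).sum
        = ((List.range arr.length).map
            (fun k => (if Char.ofNat (k + 97) = c then arr.getD k 0 else 0)
              + (if Char.ofNat (k + 97) ∈ S' then arr.getD k 0 else 0))).sum := by
          exact congrArg List.sum (List.map_congr_left (fun k _ => hsplit k))
      _ = ((List.range arr.length).map
            (fun k => if Char.ofNat (k + 97) = c then arr.getD k 0 else 0)).sum
          + ((List.range arr.length).map
            (fun k => if Char.ofNat (k + 97) ∈ S' then arr.getD k 0 else 0)).sum := by
          rw [← List.sum_map_add]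
      _ = _ := by
          rw [single_char_sum arr c (hb c (List.mem_cons_self)).1 (hb c (List.mem_cons_self)).2,
            ih hnd' hb', List.map_cons, List.sum_cons]

-- characterisation of port A as a sum over alphabet slots
theorem heuristicTwo_eq_sum (word : String) (arr : List Int) :
    heuristicTwo word arr
      = ((List.range arr.length).map
          (fun k => if Char.ofNat (k + 97) ∈ word.toList then arr.getD k 0 else 0)).sum := by
  unfold heuristicTwo
  rw [PySem.List.pyRange_one]
  have : ((arr.length : Int) - 0).toNat = arr.length := by omega
  rw [this, List.foldl_map,
    foldl_if_add (fun k : Nat => containsPy (Char.ofNat ((0 + (k : Int)) + 97).toNat) word.toList = true)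
      (fun k : Nat => PySem.List.pyGetD arr (0 + (k : Int)) 0) (List.range arr.length) 0]
  simp only [zero_add]
  refine congrArg List.sum (List.map_congr_left ?_)
  intro k _
  have h1 : (((k : Int)) + 97).toNat = k + 97 := by omega
  rw [h1, PySem.List.pyGetD_natCast]
  by_cases hm : Char.ofNat (k + 97) ∈ word.toList
  · simp [hm, (containsPy_iff _ _).mpr hm]
  · have : ¬ containsPy (Char.ofNat (k + 97)) word.toList = true := fun h => hm ((containsPy_iff _ _).mp h)
    simp [hm, this]

-- characterisation of port B as a sum over the distinct characters
theorem heuristicTwo_alt_eq_sum (word : String) (arr : List Int) :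
    heuristicTwo_alt word arr
      = ((PySem.Set.ofList word.toList).map (fun c =>
          if 0 ≤ (c.toNat : Int) - 97 ∧ (c.toNat : Int) - 97 < (arr.length : Int) then
            PySem.List.pyGetD arr ((c.toNat : Int) - 97) 0 else 0)).sum := by
  unfold heuristicTwo_alt
  rw [foldl_if_add (fun c : Char => 0 ≤ (c.toNat : Int) - 97 ∧ (c.toNat : Int) - 97 < (arr.length : Int))
    (fun c : Char => PySem.List.pyGetD arr ((c.toNat : Int) - 97) 0)]
  simp

-- ===== VERDICT (by name: the statement is the Claim_ definition above) =====
theorem heuristicTwo_spec : Claim_equal_heuristicTwo := by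
  intro word arr hdom
  unfold Spec_heuristicTwo
  have hb : ∀ c ∈ PySem.Set.ofList word.toList, 1 ≤ c.toNat ∧ c.toNat ≤ 126 := by
    intro c hc
    have hcw : c ∈ word.toList := (PySem.Set.mem_ofList _ _).mp hc
    have hdc : pvDomChar c = true := by
      have := (Bool.and_eq_true _ _).mp hdom |>.1
      unfold pvDomStr at this
      exact List.all_eq_true.mp this c hcw
    unfold pvDomChar at hdc
    simp only [Bool.or_eq_true, Bool.and_eq_true, decide_eq_true_eq, beq_iff_eq] at hdc
    omega
  rw [heuristicTwo_eq_sum, heuristicTwo_alt_eq_sum]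
  have hmem : ∀ k : Nat, (Char.ofNat (k + 97) ∈ word.toList) ↔ (Char.ofNat (k + 97) ∈ PySem.Set.ofList word.toList) := by
    intro k; exact (PySem.Set.mem_ofList _ _).symm
  calc ((List.range arr.length).map
          (fun k => if Char.ofNat (k + 97) ∈ word.toList then arr.getD k 0 else 0)).sum
      = ((List.range arr.length).map
          (fun k => if Char.ofNat (k + 97) ∈ PySem.Set.ofList word.toList then arr.getD k 0 else 0)).sum := by
        refine congrArg List.sum (List.map_congr_left ?_); intro k _
        by_cases h : Char.ofNat (k + 97) ∈ word.toList
        · simp [h, (hmem k).mp h]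
        · have : Char.ofNat (k + 97) ∉ PySem.Set.ofList word.toList := fun hx => h ((hmem k).mpr hx)
          simp [h, this]
    _ = _ := main_sum arr _ (PySem.Set.nodup_ofList _) hb
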